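-- pv_equiv track=rewrite | github.com/mrcalixe/BOT | web_search.py | get_n_frases
-- ===== SOURCE A (Python) =====
-- def get_n_frases(frase, n):
--     i = 0
--     res = ""
--     for j in frase:
--         res = res + j
--         if j == '.':
--             i += 1
--             if i == n:
--                 break
--     return res
-- ===== SOURCE B (Python) =====
-- def get_n_frases(frase, n):
--     if n >= 1 and frase.count('.') >= n:
--         return '.'.join(frase.split('.')[:n]) + '.'
--     return frase
-- ===== Notes on version B (the rewrite author's own statement) =====
-- stated objective: simpler
-- what changed: Replaced the char-by-char accumulation loop with a period counter by a split-on-'.'/take-first-n/rejoin decomposition (return the whole string when n < 1 or fewer than n periods).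
import Mathlib
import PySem

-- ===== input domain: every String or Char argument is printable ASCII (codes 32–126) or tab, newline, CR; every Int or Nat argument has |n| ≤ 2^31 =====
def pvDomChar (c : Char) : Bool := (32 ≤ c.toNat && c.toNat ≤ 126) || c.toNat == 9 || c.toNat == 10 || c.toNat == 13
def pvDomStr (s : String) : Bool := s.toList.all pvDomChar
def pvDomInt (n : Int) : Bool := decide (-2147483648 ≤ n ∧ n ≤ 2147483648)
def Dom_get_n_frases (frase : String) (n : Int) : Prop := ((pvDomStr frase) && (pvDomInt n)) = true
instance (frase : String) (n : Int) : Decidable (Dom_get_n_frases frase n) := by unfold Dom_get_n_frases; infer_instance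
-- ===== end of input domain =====

-- B replaces A's char-by-char accumulation loop with a split-into-segments / rejoin decomposition (simpler).

-- ===== PORT A =====
-- the for-loop over the characters of `frase`, carrying the period counter `i`
-- and the accumulated prefix `res`; `break` = returning `res'` without recursing
def getNFrasesLoop (n : Int) : Int → List Char → List Char → List Char
  | _, res, [] => res
  | i, res, j :: rest =>
    let res' := res ++ [j]
    if j = '.' then
      if i + 1 = n then res'
      else getNFrasesLoop n (i + 1) res' rest
    else getNFrasesLoop n i res' rest

def get_n_frases (frase : String) (n : Int) : String :=
  String.ofList (getNFrasesLoop n 0 [] frase.toList)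

-- ===== PORT B =====
-- frase.split('.') / '.'.join(...) / frase.count('.') ported by the corresponding
-- list functions on the code points (exact for the one-character separator '.')
def get_n_frases_alt (frase : String) (n : Int) : String :=
  if 1 ≤ n ∧ n ≤ (frase.toList.count '.' : Int) then
    String.ofList ((List.intercalate ['.'] ((frase.toList.splitOn '.').take n.toNat)) ++ ['.'])
  else frase

-- ===== PRECONDITION & SPEC =====
def Spec_get_n_frases (frase : String) (n : Int) (out : String) : Prop := out = get_n_frases_alt frase n
instance (frase : String) (n : Int) (out : String) : Decidable (Spec_get_n_frases frase n out) := by unfold Spec_get_n_frases; infer_instance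

-- ===== CLAIM (what is proved, stated in full; the proofs are below) =====
def Claim_equal_get_n_frases : Prop := ∀ (frase : String) (n : Int), Dom_get_n_frases frase n → Spec_get_n_frases frase n (get_n_frases frase n)

-- ===== LEMMAS AND PROOFS =====

-- the value of the loop body on the remaining characters, with m periods still wanted
def loopCore : List Char → Int → List Char
  | [], _ => []
  | j :: rest, m =>
    j :: (if j = '.' then (if m = 1 then [] else loopCore rest (m - 1)) else loopCore rest m)

theorem getNFrasesLoop_eq_core (n : Int) (l : List Char) :
    ∀ (i : Int) (acc : List Char), getNFrasesLoop n i acc l = acc ++ loopCore l (n - i) := by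
  induction l with
  | nil => intro i acc; simp [getNFrasesLoop, loopCore]
  | cons j rest ih =>
    intro i acc
    by_cases hj : j = '.'
    · by_cases hn : i + 1 = n
      · have h1 : n - i = 1 := by omega
        simp [getNFrasesLoop, loopCore, hj, hn, h1]
      · have h1 : n - i ≠ 1 := by omega
        have h2 : n - (i + 1) = n - i - 1 := by omega
        simp [getNFrasesLoop, loopCore, hj, hn, ih, h1, h2]
    · simp [getNFrasesLoop, loopCore, hj, ih]

theorem intercalate_cons_cons (sep a b : List Char) (t : List (List Char)) :
    List.intercalate sep (a :: b :: t) = a ++ sep ++ List.intercalate sep (b :: t) := by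
  simp [List.intercalate, List.intersperse]

theorem intercalate_cons_head (sep p : List Char) (j : Char) (xs : List (List Char)) :
    List.intercalate sep ((j :: p) :: xs) = j :: List.intercalate sep (p :: xs) := by
  cases xs <;> simp [List.intercalate, List.intersperse]

theorem splitOn_ne_nil (l : List Char) : l.splitOn '.' ≠ [] := by
  simpa [List.splitOn] using List.splitOnP_ne_nil (· == '.') l

theorem core_eq_alt (l : List Char) : ∀ (m : Int),
    loopCore l m =
      (if 1 ≤ m ∧ m ≤ (l.count '.' : Int) then
        List.intercalate ['.'] ((l.splitOn '.').take m.toNat) ++ ['.']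
      else l) := by
  induction l with
  | nil =>
    intro m
    have h0 : ¬ (1 ≤ m ∧ m ≤ ((List.count '.' ([] : List Char) : Int))) := by
      rintro ⟨h1, h2⟩; simp at h2; omega
    rw [show loopCore [] m = ([] : List Char) from rfl, if_neg h0]
  | cons j rest ih =>
    intro m
    by_cases hj : j = '.'
    · subst hj
      by_cases hm : m = 1
      · subst hm
        have hcnt : (1 : Int) ≤ (('.' :: rest).count '.' : Int) := by
          simp
        simp [loopCore, List.splitOn, List.splitOnP_cons, List.intercalate]
      · rw [loopCore, if_pos rfl, if_neg hm, ih (m - 1)]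
        by_cases hc : 1 ≤ m - 1 ∧ m - 1 ≤ (rest.count '.' : Int)
        · have hc' : 1 ≤ m ∧ m ≤ (('.' :: rest).count '.' : Int) := by
            constructor
            · omega
            · simp; omega
          rw [if_pos hc, if_pos hc']
          have hsplit : ('.' :: rest).splitOn '.' = [] :: rest.splitOn '.' := by
            simp [List.splitOn, List.splitOnP_cons]
          have htake : m.toNat = (m - 1).toNat + 1 := by omega
          obtain ⟨p, ps, hps⟩ : ∃ p ps, rest.splitOn '.' = p :: ps :=
            List.exists_cons_of_ne_nil (splitOn_ne_nil rest)
          have htk : ∃ q qs, (rest.splitOn '.').take (m - 1).toNat = q :: qs := by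
            rw [hps]
            have : (m - 1).toNat ≠ 0 := by omega
            cases h : (m - 1).toNat with
            | zero => exact absurd h this
            | succ k => exact ⟨p, ps.take k, by simp⟩
          obtain ⟨q, qs, hqs⟩ := htk
          rw [hsplit, htake, List.take_succ_cons, hqs, intercalate_cons_cons]
          simp
        · have hc' : ¬ (1 ≤ m ∧ m ≤ (('.' :: rest).count '.' : Int)) := by
            simp
            intro h1; omega
          rw [if_neg hc, if_neg hc']
    · rw [loopCore, if_neg hj, ih m]
      have hcnt : ((j :: rest).count '.' : Int) = (rest.count '.' : Int) := by
        simp [hj]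
      have hsplit : (j :: rest).splitOn '.' = (rest.splitOn '.').modifyHead (List.cons j) := by
        simp [List.splitOn, List.splitOnP_cons, hj]
      by_cases hc : 1 ≤ m ∧ m ≤ (rest.count '.' : Int)
      · have hc' : 1 ≤ m ∧ m ≤ ((j :: rest).count '.' : Int) := by rw [hcnt]; exact hc
        rw [if_pos hc, if_pos hc']
        obtain ⟨p, ps, hps⟩ : ∃ p ps, rest.splitOn '.' = p :: ps :=
          List.exists_cons_of_ne_nil (splitOn_ne_nil rest)
        have htake : m.toNat = (m.toNat - 1) + 1 := by omega
        rw [hsplit, hps]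
        simp only [List.modifyHead]
        rw [htake, List.take_succ_cons, List.take_succ_cons, intercalate_cons_head]
        simp
      · have hc' : ¬ (1 ≤ m ∧ m ≤ ((j :: rest).count '.' : Int)) := by rw [hcnt]; exact hc
        rw [if_neg hc, if_neg hc']

-- ===== VERDICT (by name: the statement is the Claim_ definition above) =====
theorem get_n_frases_spec : Claim_equal_get_n_frases := by
  intro frase n _
  show get_n_frases frase n = get_n_frases_alt frase n
  rw [get_n_frases, getNFrasesLoop_eq_core, get_n_frases_alt]
  have h := core_eq_alt frase.toList n
  rw [sub_zero] at *
  rw [List.nil_append, h]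
  split_ifs with hc
  · rfl
  · exact String.ofList_toList
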